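-- pv_equiv track=rewrite | github.com/asheeshkgithb/Asheeshkumar_2410031153_IILM_GN | Maximum People Visible in a Line.py | maxPeople
-- ===== SOURCE A (Python) =====
-- def maxPeople(arr):
--     n = len(arr)
--
--     left = [0]*n
--     right = [0]*n
--
--     stack = []
--
--
--     for i in range(n):
--         count = 0
--         while stack and arr[stack[-1]] < arr[i]:
--             count += 1
--             stack.pop()
--
--         left[i] = count
--         stack.append(i)
--
--     stack.clear()
--
--
--     for i in range(n-1, -1, -1):
--         count = 0
--         while stack and arr[stack[-1]] < arr[i]:
--             count += 1
--             stack.pop()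
--
--         right[i] = count
--         stack.append(i)
--
--     ans = 0
--     for i in range(n):
--         ans = max(ans, left[i] + right[i] + 1)
--
--     return ans
-- ===== SOURCE B (Python) =====
-- def maxPeople(arr):
--     # Same answer as the stack version, but left/right counts are found by a
--     # direct outward scan with a running maximum ("survivor" rule).
--     n = len(arr)
--
--     def visible(i, idxs):
--         count = 0
--         rm = None  # running maximum of values seen so far walking away from i
--         for j in idxs:
--             if rm is None or arr[j] >= rm:   # j is a survivor
--                 if arr[j] < arr[i]:
--                     count += 1
--                     rm = arr[j]
--                 else:
--                     break
--         return count
--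
--     ans = 0
--     for i in range(n):
--         l = visible(i, range(i - 1, -1, -1))
--         r = visible(i, range(i + 1, n))
--         ans = max(ans, l + r + 1)
--     return ans
-- ===== Notes on version B (the rewrite author's own statement) =====
-- stated objective: simpler
-- what changed: Replaced A's two monotonic-stack passes (plus explicit left/right arrays) by a per-index outward scan with a running maximum that counts exactly the 'survivor' elements the stack would pop, so no stack or auxiliary arrays are kept.
import Mathlib
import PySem

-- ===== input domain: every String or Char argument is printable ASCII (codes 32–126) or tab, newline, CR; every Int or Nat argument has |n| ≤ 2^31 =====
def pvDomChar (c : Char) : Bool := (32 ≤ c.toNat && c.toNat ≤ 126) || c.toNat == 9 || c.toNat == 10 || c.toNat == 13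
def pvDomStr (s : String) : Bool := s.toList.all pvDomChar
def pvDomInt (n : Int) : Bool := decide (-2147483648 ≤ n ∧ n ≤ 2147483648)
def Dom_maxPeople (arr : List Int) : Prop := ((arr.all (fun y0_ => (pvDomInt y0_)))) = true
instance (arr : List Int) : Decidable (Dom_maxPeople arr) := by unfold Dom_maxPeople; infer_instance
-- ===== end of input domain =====

-- B replaces A's two monotonic-stack passes by direct outward running-maximum
-- scans per index (objective: simpler; not faster).

-- arr[t] for an in-range index t (every index below is in range)
def av (a : List Int) (t : Nat) : Int := a.getD t 0

-- ===== PORT A =====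
-- 'while stack and arr[stack[-1]] < arr[i]: count += 1; stack.pop()'
-- (returns the final count and the stack after the pops; stack head = top)
def popLoop (a : List Int) (x : Int) : List Nat → Int → Int × List Nat
  | [], c => (c, [])
  | t :: s, c => if av a t < x then popLoop a x s (c + 1) else (c, t :: s)

-- one iteration of either pass: compute the pop count, record it, push i
def passStep (a : List Int) (st : List Int × List Nat) (i : Nat) : List Int × List Nat :=
  let r := popLoop a (av a i) st.2 0
  (st.1 ++ [r.1], i :: r.2)

-- 'right[i] = count' with i descending fills right back-to-front, so the list of
-- counts produced by the fold over (range n).reverse is reversed at the end.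
def maxPeople (arr : List Int) : Int :=
  let n := arr.length
  let left := ((List.range n).foldl (passStep arr) ([], [])).1
  let right := (((List.range n).reverse.foldl (passStep arr) ([], [])).1).reverse
  (List.range n).foldl (fun ans i => max ans (left.getD i 0 + right.getD i 0 + 1)) 0

-- ===== PORT B =====
-- 'rm is None or arr[j] >= rm'
def rmOk : Option Int → Int → Bool
  | none, _ => true
  | some r, v => r ≤ v

-- the 'for j in idxs' loop of visible(i, idxs) in Source B
def scanGo (a : List Int) (x : Int) : Option Int → Int → List Nat → Int
  | _, c, [] => c
  | rm, c, j :: t =>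
    if rmOk rm (av a j) then
      if av a j < x then scanGo a x (some (av a j)) (c + 1) t else c
    else scanGo a x rm c t

-- range(i-1,-1,-1) ↦ (List.range i).reverse; range(i+1,n) ↦ List.range' (i+1) (n-(i+1))
def maxPeople_alt (arr : List Int) : Int :=
  let n := arr.length
  (List.range n).foldl (fun ans i =>
    let l := scanGo arr (av arr i) none 0 (List.range i).reverse
    let r := scanGo arr (av arr i) none 0 (List.range' (i + 1) (n - (i + 1)))
    max ans (l + r + 1)) 0

-- ===== PRECONDITION & SPEC =====
def Spec_maxPeople (arr : List Int) (out : Int) : Prop := out = maxPeople_alt arr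
instance (arr : List Int) (out : Int) : Decidable (Spec_maxPeople arr out) := by unfold Spec_maxPeople; infer_instance

-- ===== CLAIM (what is proved, stated in full; the proofs are below) =====
def Claim_equal_maxPeople : Prop := ∀ (arr : List Int), Dom_maxPeople arr → Spec_maxPeople arr (maxPeople arr)

-- ===== LEMMAS AND PROOFS =====

-- the stack after processing the indices 'ord' in order, starting empty
def stkPush (a : List Int) (s : List Nat) (i : Nat) : List Nat :=
  i :: s.dropWhile (fun t => av a t < av a i)

def stackOf (a : List Int) (ord : List Nat) : List Nat := ord.foldl (stkPush a) []

-- pop count of pushing a value x onto stack s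
def popCnt (a : List Int) (x : Int) (s : List Nat) : Int :=
  ((s.takeWhile (fun t => av a t < x)).length : Int)

-- effect of a running maximum on the stack
def dropO (a : List Int) : Option Int → List Nat → List Nat
  | none, s => s
  | some r, s => s.dropWhile (fun t => av a t < r)

-- the list of counts a pass emits, after having already processed 'p'
def passOuts (a : List Int) : List Nat → List Nat → List Int
  | _, [] => []
  | p, i :: t => popCnt a (av a i) (stackOf a p) :: passOuts a (p ++ [i]) t

theorem popLoop_eq (a : List Int) (x : Int) :
    ∀ (s : List Nat) (c : Int),
      popLoop a x s c = (c + popCnt a x s, s.dropWhile (fun t => av a t < x)) := by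
  intro s
  induction s with
  | nil => intro c; simp [popLoop, popCnt]
  | cons t s ih =>
    intro c
    by_cases h : av a t < x
    · rw [show popLoop a x (t :: s) c = popLoop a x s (c + 1) by simp [popLoop, h]]
      rw [ih]
      simp only [popCnt, List.takeWhile_cons, List.dropWhile_cons, h, decide_true, if_pos,
        List.length_cons]
      rw [Prod.mk.injEq]
      exact ⟨by push_cast; ring, rfl⟩
    · simp only [popLoop, popCnt, List.takeWhile_cons, List.dropWhile_cons, h, decide_false,
        if_neg, Bool.false_eq_true, not_false_eq_true, List.length_nil]
      simp

theorem stackOf_append (a : List Int) (p : List Nat) (i : Nat) :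
    stackOf a (p ++ [i]) = stkPush a (stackOf a p) i := by
  simp [stackOf, List.foldl_append]

theorem pass_eq (a : List Int) :
    ∀ (ord p : List Nat) (outs : List Int),
      ord.foldl (passStep a) (outs, stackOf a p)
        = (outs ++ passOuts a p ord, stackOf a (p ++ ord)) := by
  intro ord
  induction ord with
  | nil => intro p outs; simp [passOuts]
  | cons i t ih =>
    intro p outs
    have h1 : passStep a (outs, stackOf a p) i
        = (outs ++ [popCnt a (av a i) (stackOf a p)], stackOf a (p ++ [i])) := by
      simp [passStep, popLoop_eq, stackOf_append, stkPush]
    calc (i :: t).foldl (passStep a) (outs, stackOf a p)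
        = t.foldl (passStep a) (outs ++ [popCnt a (av a i) (stackOf a p)], stackOf a (p ++ [i])) := by
          rw [List.foldl_cons, h1]
      _ = (outs ++ passOuts a p (i :: t), stackOf a (p ++ i :: t)) := by
          rw [ih]
          simp [passOuts]

theorem dropWhile_lt_lt (a : List Int) {r' r : Int} (h : r' ≤ r) :
    ∀ (s : List Nat),
      (s.dropWhile (fun t => av a t < r')).dropWhile (fun t => av a t < r)
        = s.dropWhile (fun t => av a t < r) := by
  intro s
  induction s with
  | nil => simp
  | cons t s ih =>
    by_cases h' : av a t < r'
    · have hr : av a t < r := lt_of_lt_of_le h' h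
      rw [show (t :: s).dropWhile (fun t => av a t < r') = s.dropWhile (fun t => av a t < r') by
        simp [h']]
      rw [ih]
      rw [show (t :: s).dropWhile (fun t => av a t < r) = s.dropWhile (fun t => av a t < r) by
        simp [hr]]
    · rw [show (t :: s).dropWhile (fun t => av a t < r') = t :: s by
        simp [h']]

theorem scan_eq (a : List Int) (x : Int) :
    ∀ (ord : List Nat) (rm : Option Int) (c : Int),
      scanGo a x rm c ord = c + popCnt a x (dropO a rm (stackOf a ord.reverse)) := by
  intro ord
  induction ord with
  | nil => intro rm c; cases rm <;> simp [scanGo, dropO, stackOf, popCnt]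
  | cons j t ih =>
    intro rm c
    have hst : stackOf a ((j :: t).reverse) = stkPush a (stackOf a t.reverse) j := by
      rw [List.reverse_cons, stackOf_append]
    by_cases hok : rmOk rm (av a j) = true
    · -- j is a survivor
      have hdrop : dropO a rm (stackOf a ((j :: t).reverse))
          = j :: (stackOf a t.reverse).dropWhile (fun t' => av a t' < av a j) := by
        cases rm with
        | none => rw [hst]; rfl
        | some r =>
          have hjr : ¬ av a j < r := by simp [rmOk] at hok; omega
          rw [hst]
          simp only [dropO, stkPush, List.dropWhile_cons, hjr, decide_false, Bool.false_eq_true,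
            if_neg, not_false_eq_true]
      by_cases hlt : av a j < x
      · rw [show scanGo a x rm c (j :: t) = scanGo a x (some (av a j)) (c + 1) t by
          simp [scanGo, hok, hlt]]
        rw [ih, hdrop]
        simp only [dropO, popCnt, List.takeWhile_cons, hlt, decide_true, if_pos, List.length_cons]
        push_cast; ring
      · rw [show scanGo a x rm c (j :: t) = c by simp [scanGo, hok, hlt]]
        rw [hdrop]
        simp [popCnt, hlt]
    · -- j is dominated: rm = some r with a[j] < r
      cases rm with
      | none => simp [rmOk] at hok
      | some r =>
        have hjr : av a j < r := by simp [rmOk] at hok; omega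
        rw [show scanGo a x (some r) c (j :: t) = scanGo a x (some r) c t by
          simp [scanGo, rmOk, not_le.mpr hjr]]
        rw [ih]
        have heq : dropO a (some r) (stackOf a ((j :: t).reverse))
            = dropO a (some r) (stackOf a t.reverse) := by
          rw [hst]
          simp only [dropO, stkPush, List.dropWhile_cons, hjr, decide_true, if_pos]
          exact dropWhile_lt_lt a (le_of_lt hjr) _
        rw [heq]

theorem passOuts_getD (a : List Int) :
    ∀ (ord p : List Nat) (j : Nat), j < ord.length →
      (passOuts a p ord).getD j 0
        = popCnt a (av a (ord.getD j 0)) (stackOf a (p ++ ord.take j)) := by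
  intro ord
  induction ord with
  | nil => intro p j h; simp at h
  | cons i t ih =>
    intro p j h
    cases j with
    | zero => simp [passOuts]
    | succ j' =>
      have hj : j' < t.length := by simpa using h
      simp only [passOuts, List.getD_cons_succ, List.take_succ_cons]
      rw [ih (p ++ [i]) j' hj]
      simp

theorem passOuts_length (a : List Int) :
    ∀ (ord p : List Nat), (passOuts a p ord).length = ord.length := by
  intro ord
  induction ord with
  | nil => intro p; simp [passOuts]
  | cons x t ih => intro p; simp [passOuts, ih]

-- per-index agreement of the two programs' contributions
theorem left_eq (a : List Int) (i : Nat) (h : i < a.length) :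
    (((List.range a.length).foldl (passStep a) ([], [])).1).getD i 0
      = scanGo a (av a i) none 0 (List.range i).reverse := by
  have hp := pass_eq a (List.range a.length) [] []
  rw [show stackOf a ([] : List Nat) = [] from rfl] at hp
  rw [hp]
  simp only [List.nil_append]
  rw [passOuts_getD a (List.range a.length) [] i (by simpa using h)]
  rw [scan_eq]
  have hi : (List.range a.length).getD i 0 = i := by
    simp [List.getD_eq_getElem?_getD, h]
  rw [hi]
  simp [List.take_range, Nat.min_eq_left (Nat.le_of_lt h), dropO]

theorem right_eq (a : List Int) (i : Nat) (h : i < a.length) :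
    ((((List.range a.length).reverse.foldl (passStep a) ([], [])).1).reverse).getD i 0
      = scanGo a (av a i) none 0 (List.range' (i + 1) (a.length - (i + 1))) := by
  have hp := pass_eq a (List.range a.length).reverse [] []
  rw [show stackOf a ([] : List Nat) = [] from rfl] at hp
  rw [hp]
  simp only [List.nil_append]
  have hlen : (passOuts a [] (List.range a.length).reverse).length = a.length := by
    simp [passOuts_length]
  have hrev : ((passOuts a [] (List.range a.length).reverse).reverse).getD i 0
      = (passOuts a [] (List.range a.length).reverse).getD (a.length - 1 - i) 0 := by
    rw [List.getD_eq_getElem?_getD, List.getD_eq_getElem?_getD,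
        List.getElem?_reverse (by omega : i < (passOuts a [] (List.range a.length).reverse).length),
        hlen]
  rw [hrev]
  rw [passOuts_getD a (List.range a.length).reverse [] (a.length - 1 - i) (by simp; omega)]
  rw [scan_eq]
  have hidx : (List.range a.length).reverse.getD (a.length - 1 - i) 0 = i := by
    rw [List.getD_eq_getElem?_getD, List.getElem?_reverse (by simp; omega)]
    simp only [List.length_range]
    have : a.length - 1 - (a.length - 1 - i) = i := by omega
    rw [this]
    simp [h]
  have htake : (List.range a.length).reverse.take (a.length - 1 - i)
      = (List.range' (i + 1) (a.length - (i + 1))).reverse := by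
    have hdrop : (List.range a.length).drop (i + 1) = List.range' (i + 1) (a.length - (i + 1)) := by
      simp [List.range_eq_range', List.drop_range']
    rw [← hdrop, List.reverse_drop]
    congr 1
    simp
    omega
  rw [hidx, htake]
  simp [dropO]

theorem foldl_max_congr (f g : Int → Nat → Int) :
    ∀ (l : List Nat) (b : Int), (∀ x ∈ l, ∀ acc, f acc x = g acc x) →
      l.foldl f b = l.foldl g b := by
  intro l
  induction l with
  | nil => intro b _; rfl
  | cons x t ih =>
    intro b h
    simp only [List.foldl_cons]
    rw [h x (by simp)]
    exact ih _ (fun y hy acc => h y (by simp [hy]) acc)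

-- ===== VERDICT (by name: the statement is the Claim_ definition above) =====
theorem maxPeople_spec : Claim_equal_maxPeople := by
  intro arr _
  unfold Spec_maxPeople maxPeople maxPeople_alt
  apply foldl_max_congr
  intro i hi acc
  have h : i < arr.length := by simpa using hi
  rw [left_eq arr i h, right_eq arr i h]
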